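-- pv_equiv track=rewrite | github.com/etdoh00/CloudCalculator | testing/grade_Calc.py | calcGrade
-- ===== SOURCE A (Python) =====
-- def calcGrade(module_marks):
--     for i in module_marks:
--           if module_marks[i] > 100 or module_marks[i] < 0:
--             return "Invalid module mark. Mark must not be below 0 or exceed 100!"
--
--     new_dict={}
--
--     for key, value in module_marks.items():
--             if value >= 70:
--                 new_dict[key] = "First"
--             elif value >= 60 and value <= 69:
--                 new_dict[key] = "2:1"
--             elif value >= 50 and value <= 59:
--                 new_dict[key] = "2:2"
--             elif value >= 40 and value <= 49:
--                 new_dict[key] = "Third"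
--             elif value < 40:
--                 new_dict[key] = "Fail"
--     return new_dict
-- ===== SOURCE B (Python) =====
-- def calcGrade(module_marks):
--     for value in module_marks.values():
--         if value > 100 or value < 0:
--             return "Invalid module mark. Mark must not be below 0 or exceed 100!"
--     values = list(module_marks.values())
--     labels = ["Fail"] * len(values)
--     for threshold, label in ((40, "Third"), (50, "2:2"), (60, "2:1"), (70, "First")):
--         labels = [label if v >= threshold else old for old, v in zip(labels, values)]
--     return dict(zip(module_marks, labels))
-- ===== Notes on version B (the rewrite author's own statement) =====
-- stated objective: alternative
-- what changed: Instead of classifying each mark once through a five-branch if/elif cascade, B starts every module at "Fail" and makes four successive whole-list upgrade passes, one per ascending threshold (40/50/60/70), rebuilding the label list by zip each pass; validation becomes one loop over the values.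
import Mathlib
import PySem

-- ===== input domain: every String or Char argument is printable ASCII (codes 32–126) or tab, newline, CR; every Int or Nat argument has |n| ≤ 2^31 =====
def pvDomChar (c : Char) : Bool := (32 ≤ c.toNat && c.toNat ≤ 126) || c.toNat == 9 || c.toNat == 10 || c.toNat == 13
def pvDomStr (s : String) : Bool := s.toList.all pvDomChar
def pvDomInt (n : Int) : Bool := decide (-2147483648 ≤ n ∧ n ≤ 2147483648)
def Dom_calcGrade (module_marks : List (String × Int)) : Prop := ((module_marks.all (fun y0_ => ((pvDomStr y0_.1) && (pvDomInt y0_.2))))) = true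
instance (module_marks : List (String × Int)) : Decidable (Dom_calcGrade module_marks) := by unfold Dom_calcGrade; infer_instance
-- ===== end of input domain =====

-- B replaces A's five-branch per-mark if/elif cascade by staged whole-list upgrade passes: everyone
-- starts at "Fail" and four passes (thresholds 40/50/60/70) upgrade the labels (alternative, not faster).
-- The dict argument is marshalled as an association list; both ports first rebuild the Python dict with
-- PySem.Dict.ofList (last value wins, first position kept), exactly as dict(pairs) does.

-- ===== PORT A =====
def calcGrade (module_marks : List (String × Int)) : List (String × String) :=
  let d := PySem.Dict.ofList module_marks
  -- 'for i in module_marks: if module_marks[i] > 100 or module_marks[i] < 0: return "<error string>"'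
  -- the error string is not a value of the return type; Pre_ excludes these inputs, the port returns []
  if d.items.any (fun p => decide (100 < PySem.Dict.getD d p.1 0) || decide (PySem.Dict.getD d p.1 0 < 0)) then
    []
  else
    (d.items.foldl (fun nd p =>
      if 70 ≤ p.2 then PySem.Dict.insert nd p.1 "First"
      else if 60 ≤ p.2 ∧ p.2 ≤ 69 then PySem.Dict.insert nd p.1 "2:1"
      else if 50 ≤ p.2 ∧ p.2 ≤ 59 then PySem.Dict.insert nd p.1 "2:2"
      else if 40 ≤ p.2 ∧ p.2 ≤ 49 then PySem.Dict.insert nd p.1 "Third"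
      else if p.2 < 40 then PySem.Dict.insert nd p.1 "Fail"
      else nd) PySem.Dict.empty).items

-- ===== PORT B =====
def calcGrade_alt (module_marks : List (String × Int)) : List (String × String) :=
  let d := PySem.Dict.ofList module_marks
  -- 'for value in module_marks.values(): if value > 100 or value < 0: return "<error string>"'
  if d.values.any (fun v => decide (100 < v) || decide (v < 0)) then
    []  -- Python B returns the error string here; excluded by Pre_
  else
    let values := d.values
    -- labels = ["Fail"] * len(values); four upgrade passes, one per ascending threshold
    let labels := [((40 : Int), "Third"), (50, "2:2"), (60, "2:1"), (70, "First")].foldl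
      (fun labels tl => (labels.zip values).map (fun ov => if tl.1 ≤ ov.2 then tl.2 else ov.1))
      (List.replicate values.length "Fail")
    -- dict(zip(module_marks, labels))
    (PySem.Dict.ofList (d.keys.zip labels)).items

-- ===== PRECONDITION & SPEC =====
-- Pre_ excludes inputs whose dict holds a mark > 100 or < 0: there A returns an error STRING, not a dict
-- of grades (outside the declared return type).
def Pre_calcGrade (module_marks : List (String × Int)) : Prop :=
  ∀ p ∈ (PySem.Dict.ofList module_marks).items, 0 ≤ p.2 ∧ p.2 ≤ 100
instance (module_marks : List (String × Int)) : Decidable (Pre_calcGrade module_marks) := by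
  unfold Pre_calcGrade; infer_instance
def pvWitness_calcGrade : (List (String × Int)) := [("maths", 65), ("physics", 40)]

def Spec_calcGrade (module_marks : List (String × Int)) (out : List (String × String)) : Prop := out = calcGrade_alt module_marks
instance (module_marks : List (String × Int)) (out : List (String × String)) : Decidable (Spec_calcGrade module_marks out) := by unfold Spec_calcGrade; infer_instance

-- ===== CLAIM (what is proved, stated in full; the proofs are below) =====
def Claim_equal_calcGrade : Prop := ∀ (module_marks : List (String × Int)), Dom_calcGrade module_marks → Pre_calcGrade module_marks → Spec_calcGrade module_marks (calcGrade module_marks)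

-- ===== LEMMAS AND PROOFS =====

-- A's cascade as a function of the mark
def labelA (v : Int) : String :=
  if 70 ≤ v then "First"
  else if 60 ≤ v ∧ v ≤ 69 then "2:1"
  else if 50 ≤ v ∧ v ≤ 59 then "2:2"
  else if 40 ≤ v ∧ v ≤ 49 then "Third"
  else "Fail"

lemma contains_false_of_not_mem_keys {ν : Type} (d : PySem.Dict String ν) (k : String)
    (h : k ∉ d.keys) : d.contains k = false := by
  cases hc : d.contains k
  · rfl
  · exact absurd ((PySem.Dict.contains_iff_mem_keys d k).mp hc) h

lemma foldl_insert_items (f : String × Int → String) :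
    ∀ (l : List (String × Int)) (acc : PySem.Dict String String),
      (l.map Prod.fst).Nodup → (∀ p ∈ l, p.1 ∉ acc.keys) →
      (l.foldl (fun nd p => nd.insert p.1 (f p)) acc).items
        = acc.items ++ l.map (fun p => (p.1, f p))
  | [], acc, _, _ => by simp
  | p :: l, acc, hnd, hdisj => by
    have hc : acc.contains p.1 = false :=
      contains_false_of_not_mem_keys acc p.1 (hdisj p (List.mem_cons_self ..))
    have hkeys : (acc.insert p.1 (f p)).keys = acc.keys ++ [p.1] :=
      PySem.Dict.keys_insert_of_not_contains acc (f p) hc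
    have hdisj' : ∀ q ∈ l, q.1 ∉ (acc.insert p.1 (f p)).keys := by
      intro q hq
      rw [hkeys]
      simp only [List.mem_append, List.mem_singleton]
      rintro (h | h)
      · exact hdisj q (List.mem_cons_of_mem _ hq) h
      · have : p.1 ∈ l.map Prod.fst := h ▸ List.mem_map_of_mem hq
        simp only [List.map_cons, List.nodup_cons] at hnd
        exact hnd.1 this
    simp only [List.foldl_cons]
    rw [foldl_insert_items f l _ (by simpa using (List.nodup_cons.mp (by simpa using hnd)).2) hdisj',
        PySem.Dict.items_insert_of_not_contains acc (f p) hc]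
    simp

-- one upgrade pass over a label list that is a map of the value list
lemma zip_map_pass (t : Int) (lab : String) (g : Int → String) (vs : List Int) :
    ((vs.map g).zip vs).map (fun ov => if t ≤ ov.2 then lab else ov.1)
      = vs.map (fun v => if t ≤ v then lab else g v) := by
  induction vs with
  | nil => rfl
  | cons v vs ih => simp only [List.map_cons, List.zip_cons_cons, ih]

-- the staged passes compute, per value, the fold of the threshold table
lemma stages (vs : List Int) :
    ∀ (tls : List (Int × String)) (g : Int → String),
      tls.foldl (fun labels tl => (labels.zip vs).map (fun ov => if tl.1 ≤ ov.2 then tl.2 else ov.1)) (vs.map g)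
        = vs.map (fun v => tls.foldl (fun acc tl => if tl.1 ≤ v then tl.2 else acc) (g v))
  | [], g => by simp
  | tl :: tls, g => by
    simp only [List.foldl_cons]
    rw [zip_map_pass tl.1 tl.2 g vs, stages vs tls (fun v => if tl.1 ≤ v then tl.2 else g v)]

-- A's cascade equals B's staged result, for every integer mark
lemma labelA_eq_stage (v : Int) :
    labelA v = (if 70 ≤ v then "First" else if 60 ≤ v then "2:1"
                else if 50 ≤ v then "2:2" else if 40 ≤ v then "Third" else "Fail") := by
  unfold labelA
  split_ifs <;> first | rfl | omega

-- ofList of a list with distinct keys keeps it as is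
lemma items_ofList_of_nodup (l : List (String × String)) (h : (l.map Prod.fst).Nodup) :
    (PySem.Dict.ofList l).items = l := by
  have := PySem.Dict.items_foldl_insert_fresh l Prod.fst Prod.snd PySem.Dict.empty
    (by intro a _; exact PySem.Dict.contains_empty a.1) h
  simpa using this

-- ===== VERDICT (by name: the statement is the Claim_ definition above) =====
theorem calcGrade_spec : Claim_equal_calcGrade := by
  intro mm _hdom hpre
  unfold Spec_calcGrade calcGrade calcGrade_alt
  set d := PySem.Dict.ofList mm with hd
  have hnk : d.keys.Nodup := PySem.Dict.nodup_keys_ofList mm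
  have hget : ∀ p ∈ d.items, PySem.Dict.getD d p.1 0 = p.2 := by
    intro p hp
    exact PySem.Dict.getD_of_get?_eq_some d 0 (PySem.Dict.get?_of_mem_items d (by simpa using hp) hnk)
  have hguardA : d.items.any (fun p => decide (100 < PySem.Dict.getD d p.1 0)
      || decide (PySem.Dict.getD d p.1 0 < 0)) = false := by
    simp only [List.any_eq_false]
    intro p hp
    have := hpre p hp
    rw [hget p hp]
    simp; omega
  have hguardB : d.values.any (fun v => decide (100 < v) || decide (v < 0)) = false := by
    show (d.items.map Prod.snd).any _ = false
    simp only [List.any_map, List.any_eq_false]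
    intro p hp
    have := hpre p hp
    simp [Function.comp]; omega
  simp only [hguardA, hguardB, Bool.false_eq_true, if_false]
  -- A side: the cascade loop appends (key, labelA value) pairs
  have hbody : ∀ (nd : PySem.Dict String String) (p : String × Int),
      (if 70 ≤ p.2 then PySem.Dict.insert nd p.1 "First"
       else if 60 ≤ p.2 ∧ p.2 ≤ 69 then PySem.Dict.insert nd p.1 "2:1"
       else if 50 ≤ p.2 ∧ p.2 ≤ 59 then PySem.Dict.insert nd p.1 "2:2"
       else if 40 ≤ p.2 ∧ p.2 ≤ 49 then PySem.Dict.insert nd p.1 "Third"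
       else if p.2 < 40 then PySem.Dict.insert nd p.1 "Fail"
       else nd) = PySem.Dict.insert nd p.1 (labelA p.2) := by
    intro nd p
    unfold labelA
    split_ifs <;> first | rfl | omega
  simp only [hbody]
  rw [foldl_insert_items (fun p => labelA p.2) d.items PySem.Dict.empty hnk (by simp [PySem.Dict.keys_empty])]
  -- B side: the staged passes
  have hvals : d.values = d.items.map Prod.snd := rfl
  have hkeys : d.keys = d.items.map Prod.fst := rfl
  have hrep : List.replicate (d.items.map Prod.snd).length "Fail" = (d.items.map Prod.snd).map (fun _ => "Fail") :=
    by rw [List.map_const']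
  rw [hvals, hkeys]
  rw [hrep,
      stages (d.items.map Prod.snd) [((40 : Int), "Third"), (50, "2:2"), (60, "2:1"), (70, "First")] (fun _ => "Fail")]
  simp only [List.foldl_cons, List.foldl_nil, List.map_map]
  rw [List.zip_map']
  rw [items_ofList_of_nodup _ (by simpa using hnk)]
  simp only [PySem.Dict.empty, List.nil_append]
  apply List.map_congr_left
  intro p _
  simp only [Function.comp]
  rw [labelA_eq_stage p.2]
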